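-- pv_equiv track=rewrite | github.com/ssweber/clicknick | src/clicknick/ladder/csv_token_parser.py | _decode_af_string_literal
-- ===== SOURCE A (Python) =====
-- def _decode_af_string_literal(arg: str) -> str:
--     if not arg:
--         return arg
--
--     if not (arg.startswith('"') or arg.endswith('"')):
--         return arg
--
--     if len(arg) < 2 or not (arg.startswith('"') and arg.endswith('"')):
--         raise ValueError(f"Malformed AF quoted string argument: {arg!r}")
--
--     chars: list[str] = []
--     idx = 1
--     end = len(arg) - 1
--     while idx < end:
--         ch = arg[idx]
--         if ch != '"':
--             chars.append(ch)
--             idx += 1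
--             continue
--
--         if idx + 1 < end and arg[idx + 1] == '"':
--             chars.append('"')
--             idx += 2
--             continue
--
--         raise ValueError(f"Malformed AF quoted string argument: {arg!r}")
--
--     return "".join(chars)
-- ===== SOURCE B (Python) =====
-- def _decode_af_string_literal(arg: str) -> str:
--     if not arg:
--         return arg
--
--     if not (arg.startswith('"') or arg.endswith('"')):
--         return arg
--
--     if len(arg) < 2 or not (arg.startswith('"') and arg.endswith('"')):
--         raise ValueError(f"Malformed AF quoted string argument: {arg!r}")
--
--     inner = arg[1:-1]
--     if '"' in inner.replace('""', ''):
--         raise ValueError(f"Malformed AF quoted string argument: {arg!r}")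
--     return inner.replace('""', '"')
-- ===== Notes on version B (the rewrite author's own statement) =====
-- stated objective: simpler
-- what changed: A's fused index-walking while-loop that accumulates characters and raises on a lone quote is replaced by two library str.replace passes on inner = arg[1:-1]: validate with '"' in inner.replace('""',''), then return inner.replace('""','"').
import Mathlib
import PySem

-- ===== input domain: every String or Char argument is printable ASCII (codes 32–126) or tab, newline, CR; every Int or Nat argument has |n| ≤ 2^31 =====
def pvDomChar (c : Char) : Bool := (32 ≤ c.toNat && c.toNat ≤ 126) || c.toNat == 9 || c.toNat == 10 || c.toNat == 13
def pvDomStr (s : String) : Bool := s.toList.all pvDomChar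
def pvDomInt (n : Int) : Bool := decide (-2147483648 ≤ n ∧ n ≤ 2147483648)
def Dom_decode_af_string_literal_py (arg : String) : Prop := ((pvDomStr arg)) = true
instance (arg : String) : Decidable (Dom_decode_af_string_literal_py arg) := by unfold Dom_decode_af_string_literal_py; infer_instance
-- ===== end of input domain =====

-- B replaces A's fused index-walking char-accumulating scan with two library replace passes
-- (validate on inner.replace('""',''), then return inner.replace('""','"')); objective: simpler.
-- On inputs where the Python raises ValueError (excluded by Pre_) both ports return "".

-- ===== PORT A =====
-- A's while loop over idx in [1, len-1): structural recursion on the list of inner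
-- characters; `none` renders the in-loop `raise ValueError`.
def pvLoopA : List Char → Option (List Char)
  | [] => some []
  | c :: t =>
    if c ≠ '"' then (pvLoopA t).map (fun r => c :: r)
    else
      match t with
      | c2 :: t2 => if c2 = '"' then (pvLoopA t2).map (fun r => '"' :: r) else none
      | [] => none

def decode_af_string_literal_py (arg : String) : String :=
  if arg.toList = [] then arg
  else if ¬ (PySem.Str.startswith arg "\"" || PySem.Str.endswith arg "\"") then arg
  else if arg.toList.length < 2 ∨ ¬ (PySem.Str.startswith arg "\"" && PySem.Str.endswith arg "\"") then
    ""  -- raise ValueError (outside Pre_)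
  else
    match pvLoopA (arg.toList.tail.dropLast) with
    | some out => String.ofList out   -- "".join(chars)
    | none => ""                  -- raise ValueError (outside Pre_)

-- ===== PORT B =====
def decode_af_string_literal_py_alt (arg : String) : String :=
  if arg.toList = [] then arg
  else if ¬ (PySem.Str.startswith arg "\"" || PySem.Str.endswith arg "\"") then arg
  else if arg.toList.length < 2 ∨ ¬ (PySem.Str.startswith arg "\"" && PySem.Str.endswith arg "\"") then
    ""  -- raise ValueError (outside Pre_)
  else
    let inner := PySem.List.slice arg.toList (some 1) (some (-1))  -- arg[1:-1]
    if PySem.Chars.isIn ['"'] (PySem.Chars.replace inner ['"', '"'] []) then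
      ""  -- raise ValueError (outside Pre_)
    else String.ofList (PySem.Chars.replace inner ['"', '"'] ['"'])

-- ===== PRECONDITION & SPEC =====
-- Pre_ excludes exactly the inputs on which the Python A raises ValueError: a string
-- quoted on only one end (or a lone '"'), and a both-ends-quoted string whose interior
-- contains a quote not part of a doubled pair ('""').
def Pre_decode_af_string_literal_py (arg : String) : Prop :=
  arg.toList = [] ∨
  (¬ (['"'] <+: arg.toList) ∧ ¬ (['"'] <:+ arg.toList)) ∨
  (['"'] <+: arg.toList ∧ ['"'] <:+ arg.toList ∧ 2 ≤ arg.toList.length ∧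
    '"' ∉ PySem.Chars.replace (arg.toList.tail.dropLast) ['"', '"'] [])
instance (arg : String) : Decidable (Pre_decode_af_string_literal_py arg) := by
  unfold Pre_decode_af_string_literal_py; infer_instance

def pvWitness_decode_af_string_literal_py : String := "\"a\"\"b\""

def Spec_decode_af_string_literal_py (arg : String) (out : String) : Prop := out = decode_af_string_literal_py_alt arg
instance (arg : String) (out : String) : Decidable (Spec_decode_af_string_literal_py arg out) := by unfold Spec_decode_af_string_literal_py; infer_instance

-- ===== CLAIM (what is proved, stated in full; the proofs are below) =====
def Claim_equal_decode_af_string_literal_py : Prop := ∀ (arg : String), Dom_decode_af_string_literal_py arg → Pre_decode_af_string_literal_py arg → Spec_decode_af_string_literal_py arg (decode_af_string_literal_py arg)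

-- ===== LEMMAS AND PROOFS =====

-- Python str.replace(old, new) as a plain left-to-right recursion for old = '""'.
def pvRep (new : List Char) : List Char → List Char
  | [] => []
  | [c] => [c]
  | c :: c2 :: t =>
    if c = '"' ∧ c2 = '"' then new ++ pvRep new t else c :: pvRep new (c2 :: t)

theorem pvGo_eq (new : List Char) :
    ∀ (fuel : Nat) (l acc : List Char), l.length ≤ fuel →
      PySem.Chars.replace.go ['"', '"'] new fuel l acc = acc.reverse ++ pvRep new l := by
  intro fuel
  induction fuel with
  | zero =>
    intro l acc h
    have : l = [] := by cases l <;> simp_all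
    subst this
    rw [PySem.Chars.replace.go]; simp [pvRep]
  | succ n ih =>
    intro l acc h
    match l with
    | [] =>
      rw [PySem.Chars.replace.go]
      simp [pvRep]
      omega
    | [c] =>
      rw [PySem.Chars.replace.go]
      have hp : (['"', '"'].isPrefixOf [c]) = false := by
        simp [List.isPrefixOf]
      simp only [hp, Bool.false_eq_true, if_false]
      rw [ih [] (c :: acc) (by simp)]
      simp [pvRep]
    | c :: c2 :: t =>
      rw [PySem.Chars.replace.go]
      by_cases hq : c = '"' ∧ c2 = '"'
      · obtain ⟨h1, h2⟩ := hq; subst h1; subst h2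
        have hp : (['"', '"'].isPrefixOf ('"' :: '"' :: t)) = true := by
          simp [List.isPrefixOf]
        simp only [hp, if_true, List.length_cons, List.length_nil, List.drop_succ_cons, List.drop_zero]
        rw [ih t (new.reverse ++ acc) (by simp at h ⊢; omega)]
        simp [pvRep]
      · have hp : (['"', '"'].isPrefixOf (c :: c2 :: t)) = false := by
          simp only [List.isPrefixOf, Bool.and_eq_false_iff]
          rcases not_and_or.mp hq with h1 | h2
          · left; simp [beq_eq_false_iff_ne]; exact fun e => h1 e.symm
          · right; simp [beq_eq_false_iff_ne]
            intro e; exact absurd e.symm h2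
        simp only [hp, Bool.false_eq_true, if_false]
        rw [ih (c2 :: t) (c :: acc) (by simp at h ⊢; omega)]
        have : pvRep new (c :: c2 :: t) = c :: pvRep new (c2 :: t) := by
          simp [pvRep, hq]
        rw [this]; simp

theorem pvReplace_eq (new l : List Char) :
    PySem.Chars.replace l ['"', '"'] new = pvRep new l := by
  rw [PySem.Chars.replace]
  simp [pvGo_eq new l.length l [] (le_refl _)]

theorem pvLoopA_char (l : List Char) :
    pvLoopA l = if '"' ∈ pvRep [] l then none else some (pvRep ['"'] l) := by
  induction l using pvLoopA.induct with
  | case1 => simp [pvLoopA, pvRep]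
  | case2 c t hc ih =>
    match t with
    | [] => simp [pvLoopA, pvRep, hc, Ne.symm hc]
    | c2 :: t2 =>
      have hr : ¬ (c = '"' ∧ c2 = '"') := fun hh => hc (by simp [hh.1])
      simp only [pvLoopA, pvRep, hr, if_false, ih]
      by_cases hm : '"' ∈ pvRep [] (c2 :: t2) <;>
        simp [hm, hc, Ne.symm hc]
  | case3 c hc t2 ih =>
    rw [not_not] at hc; subst hc
    simp only [pvLoopA, pvRep, if_neg (not_not_intro rfl), ih]
    by_cases hm : '"' ∈ pvRep [] t2 <;> simp [hm]
  | case4 c hc c2 t2 hc2 =>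
    rw [not_not] at hc; subst hc
    have hr : ¬ ('"' = '"' ∧ c2 = '"') := fun hh => hc2 hh.2
    simp [pvLoopA, pvRep, hc2]
  | case5 c hc =>
    rw [not_not] at hc; subst hc
    simp [pvLoopA, pvRep]

theorem pvSlice_inner (cs : List Char) (h : 2 ≤ cs.length) :
    PySem.List.slice cs (some 1) (some (-1)) = cs.tail.dropLast := by
  simp only [PySem.List.slice, PySem.List.clampIdx]
  norm_num
  rw [show ((cs.length : Int) + -1).toNat = cs.length - 1 by omega,
      show min 1 cs.length = 1 by omega,
      if_neg (by intro e; simp [e] at h)]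
  rw [List.dropLast_eq_take, List.drop_one, List.length_tail]

theorem pvSingleton_infix_iff (c : Char) (x : List Char) : [c] <:+: x ↔ c ∈ x := by
  constructor
  · intro h; exact h.subset (List.mem_singleton_self _)
  · intro h
    obtain ⟨a, b, rfl⟩ := List.append_of_mem h
    exact ⟨a, b, by simp⟩

theorem pvGuards {arg : String}
    (h3 : ¬(arg.toList.length < 2 ∨ ¬(PySem.Str.startswith arg "\"" && PySem.Str.endswith arg "\"") = true)) :
    ['"'] <+: arg.toList ∧ ['"'] <:+ arg.toList ∧ 2 ≤ arg.toList.length := by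
  rcases not_or.mp h3 with ⟨hlen, hb⟩
  rw [not_not, Bool.and_eq_true] at hb
  refine ⟨?_, ?_, by omega⟩
  · have := (PySem.Chars.startswith_iff arg.toList ("\"" : String).toList).mp (by simpa using hb.1)
    simpa using this
  · have := (PySem.Chars.endswith_iff arg.toList ("\"" : String).toList).mp (by simpa using hb.2)
    simpa using this

-- ===== VERDICT (by name: the statement is the Claim_ definition above) =====
theorem decode_af_string_literal_py_spec : Claim_equal_decode_af_string_literal_py := by
  intro arg hdom hpre
  unfold Spec_decode_af_string_literal_py
  unfold decode_af_string_literal_py decode_af_string_literal_py_alt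
  split_ifs with h1 h2 h3
  all_goals try rfl
  · have hs := pvGuards h3
    have hv : '"' ∉ pvRep [] arg.toList.tail.dropLast := by
      rw [← pvReplace_eq]
      rcases hpre with h | h | h
      · exact absurd h h1
      · exact absurd hs.1 h.1
      · exact h.2.2.2
    have hfalse : PySem.Chars.isIn ['"'] (pvRep [] arg.toList.tail.dropLast) = false := by
      rw [PySem.Chars.isIn_eq_false_iff, pvSingleton_infix_iff]; exact hv
    simp only [pvSlice_inner _ hs.2.2, pvReplace_eq, hfalse, Bool.false_eq_true, if_false,
      pvLoopA_char, if_neg hv]
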